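-- pv_equiv track=rewrite | github.com/Haotian9850/astr-senior-thesis | workspace/latex_generation/latex_line_printer.py | pretty_print_molecule
-- ===== SOURCE A (Python) =====
-- def pretty_print_molecule(molecule):
--     if molecule[0] == 'U':
--         return None
--     moleculeList = []
--     splitIndice = []
--     result = []
--     molecule_preprocessed = molecule.replace("v=0", "").replace("v=1", "")
--     for i in range(0, len(molecule_preprocessed) - 1):
--         if (molecule_preprocessed[i].isdigit() and not molecule_preprocessed[i + 1].isdigit()):
--             splitIndice.append(i + 1)
--         elif (not molecule_preprocessed[i].isdigit() and molecule_preprocessed[i + 1].isdigit()):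
--             splitIndice.append(i + 1)
--     splitIndice.insert(0, 0)
--     splitIndice.insert(len(splitIndice), len(molecule))
--     for i in range(0, len(splitIndice) - 1):
--         moleculeList.append(molecule_preprocessed[splitIndice[i] : splitIndice[i + 1]])
--     for element in moleculeList:
--         newElement = element
--         if element.isdigit():
--             newElement = "_{" + element + "}"
--         result.append(newElement)
--     return "".join(result)
-- ===== SOURCE B (Python) =====
-- def pretty_print_molecule(molecule):
--     if molecule[0] == 'U':
--         return None
--     s = molecule.replace("v=0", "").replace("v=1", "")
--     out = []
--     prev = False
--     for ch in s:
--         d = ch.isdigit()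
--         if d and not prev:
--             out.append("_{")
--         elif not d and prev:
--             out.append("}")
--         out.append(ch)
--         prev = d
--     if prev:
--         out.append("}")
--     return "".join(out)
-- ===== Notes on version B (the rewrite author's own statement) =====
-- stated objective: faster
-- what changed: A finds digit/non-digit boundary indices in one pass, slices the string at those indices in a second pass and transforms the slices in a third; B is a single-pass state machine over the characters that emits the opening subscript marker on entering a digit run and the closing brace on leaving it, with no index lists or slicing.
import Mathlib
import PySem

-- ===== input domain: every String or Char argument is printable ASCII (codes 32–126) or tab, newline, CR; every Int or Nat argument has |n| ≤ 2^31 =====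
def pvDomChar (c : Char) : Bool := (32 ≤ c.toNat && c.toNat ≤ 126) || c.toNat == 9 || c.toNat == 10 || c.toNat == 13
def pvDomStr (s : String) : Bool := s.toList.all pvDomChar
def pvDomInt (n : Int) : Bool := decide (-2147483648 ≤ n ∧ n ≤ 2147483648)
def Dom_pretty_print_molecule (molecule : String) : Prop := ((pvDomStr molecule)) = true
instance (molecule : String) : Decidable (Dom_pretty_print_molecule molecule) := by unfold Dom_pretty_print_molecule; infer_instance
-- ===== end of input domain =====

-- B rewrites A's three-pass structure (boundary indices, slicing, transforming the slices)
-- as a single-pass state machine emitting '_{' / '}' at digit-run transitions; return values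
-- are proved equal on all non-empty inputs (A raises IndexError on "").

-- ===== PORT A =====
-- A's first loop: collect the indices i+1 where the digit/non-digit class changes
def pvA_bounds (P : List Char) : List Int :=
  (PySem.List.pyRange 0 (PySem.List.len P - 1) 1).foldl
    (fun acc i =>
      if PySem.Chars.isdigit (PySem.List.pyGetD P i ' ') &&
         !(PySem.Chars.isdigit (PySem.List.pyGetD P (i + 1) ' ')) then acc ++ [i + 1]
      else if !(PySem.Chars.isdigit (PySem.List.pyGetD P i ' ')) &&
              PySem.Chars.isdigit (PySem.List.pyGetD P (i + 1) ' ') then acc ++ [i + 1]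
      else acc) []

-- A's second loop: slice the preprocessed string at consecutive indices
def pvA_slices (P : List Char) (I : List Int) : List (List Char) :=
  (PySem.List.pyRange 0 (PySem.List.len I - 1) 1).foldl
    (fun acc i => acc ++ [PySem.List.slice P (some (PySem.List.pyGetD I i 0))
                                             (some (PySem.List.pyGetD I (i + 1) 0))]) []

-- A's third loop: wrap all-digit slices in "_{...}"
def pvA_transform (els : List (List Char)) : List (List Char) :=
  els.foldl (fun acc e =>
    acc ++ [if PySem.Chars.strIsdigit e then ['_', '{'] ++ e ++ ['}'] else e]) []

def pretty_print_molecule (molecule : String) : Option String :=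
  if PySem.Str.pyGet? molecule 0 = some 'U' then none
  else
    let p := PySem.Str.replace (PySem.Str.replace molecule "v=0" "") "v=1" ""
    let P := p.toList
    let splitIndice := pvA_bounds P
    let splitIndice := PySem.List.insert splitIndice 0 0
    let splitIndice := PySem.List.insert splitIndice (PySem.List.len splitIndice) (PySem.Str.len molecule)
    let moleculeList := pvA_slices P splitIndice
    let result := pvA_transform moleculeList
    some (String.ofList (PySem.Chars.join [] result))

-- ===== PORT B =====
-- B's loop body: one step of the state machine (accumulated fragments, was-previous-a-digit)
def pvB_step (st : List (List Char) × Bool) (ch : Char) : List (List Char) × Bool :=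
  let d := PySem.Chars.isdigit ch
  let out := if d && !st.2 then st.1 ++ [['_', '{']]
             else if !d && st.2 then st.1 ++ [['}']]
             else st.1
  (out ++ [[ch]], d)

def pretty_print_molecule_alt (molecule : String) : Option String :=
  if PySem.Str.pyGet? molecule 0 = some 'U' then none
  else
    let s := PySem.Str.replace (PySem.Str.replace molecule "v=0" "") "v=1" ""
    let st := s.toList.foldl pvB_step ([], false)
    let out := if st.2 then st.1 ++ [['}']] else st.1
    some (String.ofList (PySem.Chars.join [] out))

-- ===== PRECONDITION & SPEC =====
-- Pre_ excludes only the empty string, on which the Python A raises IndexError at molecule[0].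
def Pre_pretty_print_molecule (molecule : String) : Prop := molecule ≠ ""
instance (molecule : String) : Decidable (Pre_pretty_print_molecule molecule) := by
  unfold Pre_pretty_print_molecule; infer_instance

def pvWitness_pretty_print_molecule : String := "H2Ov=0"

def Spec_pretty_print_molecule (molecule : String) (out : Option String) : Prop :=
  out = pretty_print_molecule_alt molecule
instance (molecule : String) (out : Option String) : Decidable (Spec_pretty_print_molecule molecule out) := by
  unfold Spec_pretty_print_molecule; infer_instance

-- ===== CLAIM (what is proved, stated in full; the proofs are below) =====
def Claim_equal_pretty_print_molecule : Prop := ∀ (molecule : String),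
  Dom_pretty_print_molecule molecule → Pre_pretty_print_molecule molecule →
  Spec_pretty_print_molecule molecule (pretty_print_molecule molecule)

-- ===== LEMMAS AND PROOFS =====

-- same digit/non-digit class as δ
def pvq (δ : Bool) : Char → Bool := fun x => PySem.Chars.isdigit x == δ

-- maximal runs of equal digit/non-digit class
def pvRuns : List Char → List (List Char)
  | [] => []
  | c :: cs =>
    (c :: cs.takeWhile (pvq (PySem.Chars.isdigit c))) ::
      pvRuns (cs.dropWhile (pvq (PySem.Chars.isdigit c)))
termination_by l => l.length
decreasing_by
  simpa using Nat.lt_succ_of_le (List.length_dropWhile_le _ cs)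

-- the transformation A applies to each piece
def pvT (r : List Char) : List Char :=
  if PySem.Chars.strIsdigit r then ['_', '{'] ++ r ++ ['}'] else r

-- slices of P at consecutive entries of an index list
def pvPair (P : List Char) : List Int → List (List Char)
  | a :: b :: t => PySem.List.slice P (some a) (some b) :: pvPair P (b :: t)
  | _ => []

-- A's boundary indices, at the Nat level
def pvBN (P : List Char) : List Nat :=
  ((List.range (P.length - 1)).filter
    (fun k => PySem.Chars.isdigit (P.getD k ' ') != PySem.Chars.isdigit (P.getD (k + 1) ' '))).map (· + 1)

-- char-level version of B's state machine (B's port accumulates fragments; this flattens them)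
def pvStep (st : List Char × Bool) (ch : Char) : List Char × Bool :=
  let d := PySem.Chars.isdigit ch
  let out := if d && !st.2 then st.1 ++ ['_', '{']
             else if !d && st.2 then st.1 ++ ['}']
             else st.1
  (out ++ [ch], d)

def pvFinish (st : List Char × Bool) : List Char := if st.2 then st.1 ++ ['}'] else st.1

lemma pvPair_cons (P : List Char) (a b : Int) (t : List Int) :
    pvPair P (a :: b :: t) = PySem.List.slice P (some a) (some b) :: pvPair P (b :: t) := rfl

lemma pvPair_single (P : List Char) (a : Int) : pvPair P [a] = [] := rfl

lemma pvRuns_cons (c : Char) (cs : List Char) :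
    pvRuns (c :: cs)
      = (c :: cs.takeWhile (pvq (PySem.Chars.isdigit c))) ::
          pvRuns (cs.dropWhile (pvq (PySem.Chars.isdigit c))) := by
  rw [pvRuns]

lemma pvHead_dropWhile (δ : Bool) (cs : List Char)
    (h : cs.dropWhile (pvq δ) ≠ []) :
    PySem.Chars.isdigit ((cs.dropWhile (pvq δ)).head h) = !δ := by
  have h0 := List.head_dropWhile_not (pvq δ) h
  unfold pvq at h0
  rw [beq_eq_false_iff_ne] at h0
  exact Bool.eq_not_of_ne h0

lemma pvJoin_nil_eq_flatten (l : List (List Char)) : PySem.Chars.join [] l = l.flatten := by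
  simp only [PySem.Chars.join]
  induction l with
  | nil => rfl
  | cons x t ih =>
    cases t with
    | nil => simp [List.intercalate]
    | cons y s =>
      simp only [List.intercalate, List.intersperse] at ih ⊢
      simp_all

lemma pvReplaceGo_len (old : List Char) :
    ∀ (fuel : Nat) (l acc : List Char),
      (PySem.Chars.replace.go old [] fuel l acc).length ≤ acc.length + l.length := by
  intro fuel
  induction fuel with
  | zero => intro l acc; simp [PySem.Chars.replace.go]
  | succ n ih =>
    intro l acc
    cases l with
    | nil => simp [PySem.Chars.replace.go]
    | cons c t =>
      rw [PySem.Chars.replace.go]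
      split
      · have := ih (List.drop old.length (c :: t)) acc
        simp only [List.reverse_nil, List.nil_append] at this ⊢
        have hd : (List.drop old.length (c :: t)).length ≤ (c :: t).length := by
          simp [List.length_drop]
        omega
      · have := ih t (c :: acc)
        simp only [List.length_cons] at this ⊢
        omega

lemma pvReplace_len (s old : List Char) (h : old.isEmpty = false) :
    (PySem.Chars.replace s old []).length ≤ s.length := by
  rw [PySem.Chars.replace, if_neg (by simp [h])]
  simpa using pvReplaceGo_len old s.length s []

lemma pvGetD_append_right (u v : List Char) (j : Nat) :
    (u ++ v).getD (u.length + j) ' ' = v.getD j ' ' := by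
  simp [List.getD_eq_getElem?_getD, List.getElem?_append_right]

lemma pvClass_append (u v : List Char) (δ : Bool)
    (hall : ∀ x ∈ u, PySem.Chars.isdigit x = δ) (k : Nat) (hk : k < u.length) :
    PySem.Chars.isdigit ((u ++ v).getD k ' ') = δ := by
  rw [List.getD_eq_getElem?_getD, List.getElem?_append_left hk, List.getElem?_eq_getElem hk]
  exact hall _ (List.getElem_mem hk)

lemma pvBounds_eq_pvBN (P : List Char) :
    pvA_bounds P = (pvBN P).map (fun (k : Nat) => (k : Int)) := by
  unfold pvA_bounds
  have hfun : (fun (acc : List Int) (i : Int) =>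
      if PySem.Chars.isdigit (PySem.List.pyGetD P i ' ') &&
         !(PySem.Chars.isdigit (PySem.List.pyGetD P (i + 1) ' ')) then acc ++ [i + 1]
      else if !(PySem.Chars.isdigit (PySem.List.pyGetD P i ' ')) &&
              PySem.Chars.isdigit (PySem.List.pyGetD P (i + 1) ' ') then acc ++ [i + 1]
      else acc)
      = (fun (acc : List Int) (i : Int) =>
      if (PySem.Chars.isdigit (PySem.List.pyGetD P i ' ')
          != PySem.Chars.isdigit (PySem.List.pyGetD P (i + 1) ' ')) = true then acc ++ [i + 1]
      else acc) := by
    funext acc i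
    cases h1 : PySem.Chars.isdigit (PySem.List.pyGetD P i ' ') <;>
      cases h2 : PySem.Chars.isdigit (PySem.List.pyGetD P (i + 1) ' ') <;> simp
  rw [hfun, PySem.List.foldl_append_if]
  rw [PySem.List.len_eq, PySem.List.pyRange_one]
  have ht : ((P.length : Int) - 1 - 0).toNat = P.length - 1 := by omega
  rw [ht, List.filter_map, List.map_map, List.nil_append]
  unfold pvBN
  have hpred : ∀ k ∈ List.range (P.length - 1),
      ((fun i => PySem.Chars.isdigit (PySem.List.pyGetD P i ' ')
          != PySem.Chars.isdigit (PySem.List.pyGetD P (i + 1) ' ')) ∘ fun k : Nat => (0 : Int) + k) k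
      = (fun k => PySem.Chars.isdigit (P.getD k ' ') != PySem.Chars.isdigit (P.getD (k + 1) ' ')) k := by
    intro k _
    have h1 : (0 : Int) + (k : Int) = ((k : Nat) : Int) := by omega
    have h2 : ((k : Nat) : Int) + 1 = (((k + 1 : Nat)) : Int) := by push_cast; ring
    simp only [Function.comp_apply, h1, h2, PySem.List.pyGetD_natCast]
  rw [List.filter_congr hpred]
  simp only [List.map_map]
  apply List.map_congr_left
  intro k _
  simp only [Function.comp_apply]
  push_cast
  omega

lemma pvMapRange_eq_pvPair (P : List Char) : ∀ (I : List Int),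
    (List.range (I.length - 1)).map
      (fun k => PySem.List.slice P (some (I.getD k 0)) (some (I.getD (k + 1) 0)))
      = pvPair P I
  | [] => rfl
  | [_] => rfl
  | a :: b :: t => by
    have ih := pvMapRange_eq_pvPair P (b :: t)
    have hlen : (a :: b :: t).length - 1 = ((b :: t).length - 1) + 1 := by simp
    rw [hlen, List.range_succ_eq_map, List.map_cons, List.map_map, pvPair_cons]
    refine congrArg₂ List.cons rfl ?_
    rw [← ih]
    apply List.map_congr_left
    intro k _
    simp [List.getD_cons_succ]

lemma pvSlices_eq_pvPair (P : List Char) (I : List Int) : pvA_slices P I = pvPair P I := by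
  unfold pvA_slices
  rw [PySem.List.foldl_append_singleton_eq_map, List.nil_append,
      PySem.List.len_eq, PySem.List.pyRange_one]
  have ht : ((I.length : Int) - 1 - 0).toNat = I.length - 1 := by omega
  rw [ht, List.map_map, ← pvMapRange_eq_pvPair P I]
  apply List.map_congr_left
  intro k _
  have h1 : (0 : Int) + (k : Int) = ((k : Nat) : Int) := by omega
  have h2 : ((k : Nat) : Int) + 1 = (((k + 1 : Nat)) : Int) := by push_cast; ring
  simp only [Function.comp_apply, h1, h2, PySem.List.pyGetD_natCast]

lemma pvBN_run_nil (run rest : List Char) (δ : Bool)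
    (hall : ∀ x ∈ run, PySem.Chars.isdigit x = δ) (m : Nat) (hm : m ≤ run.length) :
    (List.range (m - 1)).filter
      (fun k => PySem.Chars.isdigit ((run ++ rest).getD k ' ')
                != PySem.Chars.isdigit ((run ++ rest).getD (k + 1) ' ')) = [] := by
  rw [List.filter_eq_nil_iff]
  intro k hk
  rw [List.mem_range] at hk
  have h1 : PySem.Chars.isdigit ((run ++ rest).getD k ' ') = δ :=
    pvClass_append run rest δ hall k (by omega)
  have h2 : PySem.Chars.isdigit ((run ++ rest).getD (k + 1) ' ') = δ :=
    pvClass_append run rest δ hall (k + 1) (by omega)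
  simp only [h1, h2, bne_self_eq_false]
  exact Bool.false_ne_true

lemma pvBN_append (δ : Bool) (run rest : List Char)
    (hne : run ≠ []) (hall : ∀ x ∈ run, PySem.Chars.isdigit x = δ)
    (hrest : ∀ (h : rest ≠ []), PySem.Chars.isdigit (rest.head h) = !δ) :
    pvBN (run ++ rest)
      = if rest.isEmpty then [] else run.length :: (pvBN rest).map (· + run.length) := by
  have hm : 0 < run.length := List.length_pos_of_ne_nil hne
  cases rest with
  | nil =>
    rw [List.isEmpty_nil, if_pos rfl]
    unfold pvBN
    rw [List.length_append, List.length_nil, Nat.add_zero,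
        pvBN_run_nil run [] δ hall run.length (le_refl _), List.map_nil]
  | cons r0 rs =>
    rw [List.isEmpty_cons, if_neg (by simp)]
    have hr0 : PySem.Chars.isdigit r0 = !δ := by simpa using hrest (by simp)
    unfold pvBN
    have hlen : (run ++ r0 :: rs).length - 1 = run.length + rs.length := by
      simp [List.length_append]
    have hlen2 : (r0 :: rs).length - 1 = rs.length := by simp
    rw [hlen, hlen2, List.range_add, List.filter_append]
    have hc1 : PySem.Chars.isdigit ((run ++ r0 :: rs).getD (run.length - 1) ' ') = δ :=
      pvClass_append run (r0 :: rs) δ hall (run.length - 1) (by omega)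
    have hc2 : PySem.Chars.isdigit ((run ++ r0 :: rs).getD (run.length - 1 + 1) ' ') = !δ := by
      rw [show run.length - 1 + 1 = run.length + 0 by omega, pvGetD_append_right]
      simpa using hr0
    have hpart1 : (List.range run.length).filter
        (fun k => PySem.Chars.isdigit ((run ++ r0 :: rs).getD k ' ')
                  != PySem.Chars.isdigit ((run ++ r0 :: rs).getD (k + 1) ' ')) = [run.length - 1] := by
      have hrange : List.range run.length = List.range (run.length - 1) ++ [run.length - 1] := by
        conv_lhs => rw [show run.length = (run.length - 1) + 1 by omega]
        exact List.range_succ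
      rw [hrange, List.filter_append,
          pvBN_run_nil run (r0 :: rs) δ hall run.length (le_refl _)]
      have hpt : (PySem.Chars.isdigit ((run ++ r0 :: rs).getD (run.length - 1) ' ')
          != PySem.Chars.isdigit ((run ++ r0 :: rs).getD (run.length - 1 + 1) ' ')) = true := by
        rw [hc1, hc2]
        cases δ <;> rfl
      simp only [List.nil_append, List.filter_cons, List.filter_nil, hpt, if_true]
    have hpart2 : ((List.range rs.length).map (fun x => run.length + x)).filter
        (fun k => PySem.Chars.isdigit ((run ++ r0 :: rs).getD k ' ')
                  != PySem.Chars.isdigit ((run ++ r0 :: rs).getD (k + 1) ' '))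
        = ((List.range rs.length).filter
            (fun j => PySem.Chars.isdigit ((r0 :: rs).getD j ' ')
                      != PySem.Chars.isdigit ((r0 :: rs).getD (j + 1) ' '))).map
            (fun x => run.length + x) := by
      rw [List.filter_map]
      congr 1
      apply List.filter_congr
      intro j _
      have e1 : (run ++ r0 :: rs).getD (run.length + j) ' ' = (r0 :: rs).getD j ' ' :=
        pvGetD_append_right run (r0 :: rs) j
      have e2 : (run ++ r0 :: rs).getD (run.length + j + 1) ' ' = (r0 :: rs).getD (j + 1) ' ' := by
        rw [Nat.add_assoc]
        exact pvGetD_append_right run (r0 :: rs) (j + 1)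
      simp only [Function.comp_apply, e1, e2]
    rw [hpart1, hpart2]
    simp only [List.map_append, List.map_cons, List.map_nil, List.map_map,
               List.cons_append, List.nil_append]
    congr 1
    · omega
    · apply List.map_congr_left
      intro j _
      simp only [Function.comp_apply]
      omega

lemma pvPair_shift (u v : List Char) : ∀ (J : List Int), (∀ a ∈ J, 0 ≤ a) →
    pvPair (u ++ v) (J.map (· + (u.length : Int))) = pvPair v J
  | [] => by intro _; rfl
  | [_] => by intro _; rfl
  | a :: b :: t => by
    intro hpos
    have ha : 0 ≤ a := hpos a (by simp)
    have hb : 0 ≤ b := hpos b (by simp)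
    have ih := pvPair_shift u v (b :: t) (fun x hx => hpos x (by simp [hx]))
    simp only [List.map_cons] at ih ⊢
    rw [pvPair_cons, pvPair_cons]
    have hhead : PySem.List.slice (u ++ v) (some (a + (u.length : Int)))
        (some (b + (u.length : Int))) = PySem.List.slice v (some a) (some b) := by
      rw [PySem.List.slice_toNat _ (by omega) (by omega),
          PySem.List.slice_toNat _ ha hb]
      have h2 : (b + (u.length : Int)).toNat - (a + (u.length : Int)).toNat
          = b.toNat - a.toNat := by omega
      have h1 : (a + (u.length : Int)).toNat = u.length + a.toNat := by omega
      rw [h2, h1, List.drop_length_add_append]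
    exact congrArg₂ List.cons hhead ih

lemma pvA_runs : ∀ (n : Nat) (P : List Char) (L : Int), P ≠ [] → P.length ≤ n →
    (P.length : Int) ≤ L →
    pvPair P (0 :: (pvBN P).map (fun (k : Nat) => (k : Int)) ++ [L]) = pvRuns P := by
  intro n
  induction n with
  | zero =>
    intro P L hne hlen _
    cases P with
    | nil => exact absurd rfl hne
    | cons c cs => simp at hlen
  | succ n ih =>
    intro P L hne hlen hL
    cases P with
    | nil => exact absurd rfl hne
    | cons c cs =>
      have hL0 : (0 : Int) ≤ L := le_trans (Int.natCast_nonneg (c :: cs).length) hL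
      have hP : c :: cs = (c :: cs.takeWhile (pvq (PySem.Chars.isdigit c)))
          ++ cs.dropWhile (pvq (PySem.Chars.isdigit c)) := by
        rw [List.cons_append, List.takeWhile_append_dropWhile]
      have hall : ∀ x ∈ c :: cs.takeWhile (pvq (PySem.Chars.isdigit c)),
          PySem.Chars.isdigit x = PySem.Chars.isdigit c := by
        intro x hx
        rcases List.mem_cons.mp hx with h | h
        · rw [h]
        · exact eq_of_beq (by simpa [pvq] using List.mem_takeWhile_imp h)
      have hrest := pvHead_dropWhile (PySem.Chars.isdigit c) cs
      have hlenP : cs.length + 1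
          = (c :: cs.takeWhile (pvq (PySem.Chars.isdigit c))).length
            + (cs.dropWhile (pvq (PySem.Chars.isdigit c))).length := by
        have h := congrArg List.length hP
        simp only [List.length_cons, List.length_append] at h ⊢
        omega
      rw [pvRuns_cons, hP, pvBN_append (PySem.Chars.isdigit c) _ _ (by simp) hall hrest]
      rcases hdwe : cs.dropWhile (pvq (PySem.Chars.isdigit c)) with _ | ⟨r0, rs⟩
      · -- the whole string is one run
        rw [hdwe] at hP hlenP
        simp only [List.isEmpty_nil, List.map_nil, List.append_nil, if_true]
        rw [List.singleton_append, pvPair_cons, pvPair_single, pvRuns, PySem.List.slice_zero_start,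
            PySem.List.slice_to _ hL0]
        have htake : List.take L.toNat (c :: cs.takeWhile (pvq (PySem.Chars.isdigit c)))
            = c :: cs.takeWhile (pvq (PySem.Chars.isdigit c)) := by
          apply List.take_of_length_le
          have h2 := congrArg List.length hP
          rw [List.append_nil] at h2
          omega
        rw [htake]
      · rw [hdwe] at hP hlenP hrest
        simp only [List.isEmpty_cons, Bool.false_eq_true, if_false]
        rw [List.map_cons]
        simp only [List.cons_append]
        rw [pvPair_cons]
        have hm0 : (0 : Int) ≤ ((c :: cs.takeWhile (pvq (PySem.Chars.isdigit c))).length : Int) := by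
          positivity
        have hLm : ((r0 :: rs).length : Int)
            ≤ L - ((c :: cs.takeWhile (pvq (PySem.Chars.isdigit c))).length : Int) := by
          have hcc : ((c :: cs).length : Int) ≤ L := hL
          have h2 : (c :: cs).length
              = (c :: cs.takeWhile (pvq (PySem.Chars.isdigit c))).length + (r0 :: rs).length := by
            rw [hP, List.length_append]
          rw [h2] at hcc
          push_cast at hcc ⊢
          omega
        congr 1
        · -- the first slice is the first run
          rw [PySem.List.slice_zero_start, PySem.List.slice_to _ hm0, Int.toNat_natCast,
              ← List.cons_append, List.take_left]
        · -- remaining slices = runs of the remainder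
          have hkey : (((c :: cs.takeWhile (pvq (PySem.Chars.isdigit c))).length : Int)
                :: (((pvBN (r0 :: rs)).map
                      (· + (c :: cs.takeWhile (pvq (PySem.Chars.isdigit c))).length)).map
                    (fun (k : Nat) => (k : Int)) ++ [L]))
              = ((0 :: (pvBN (r0 :: rs)).map (fun (k : Nat) => (k : Int)))
                  ++ [L - ((c :: cs.takeWhile (pvq (PySem.Chars.isdigit c))).length : Int)]).map
                  (· + ((c :: cs.takeWhile (pvq (PySem.Chars.isdigit c))).length : Int)) := by
            simp only [List.map_cons, List.map_append, List.map_map, List.map_nil,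
                       List.cons_append]
            refine congrArg₂ List.cons (by omega) ?_
            refine congrArg₂ (· ++ ·) ?_ ?_
            · apply List.map_congr_left
              intro j _
              simp only [Function.comp_apply]
              push_cast
              ring
            · exact congrArg (fun z : Int => [z]) (by omega)
          have heq : c :: (List.takeWhile (pvq (PySem.Chars.isdigit c)) cs ++ r0 :: rs)
              = (c :: List.takeWhile (pvq (PySem.Chars.isdigit c)) cs) ++ r0 :: rs := rfl
          rw [hkey, heq, pvPair_shift]
          · apply ih _ _ (by simp) _ hLm
            have h1 := List.length_dropWhile_le (pvq (PySem.Chars.isdigit c)) cs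
            rw [hdwe] at h1
            simp only [List.length_cons] at hlen h1 ⊢
            omega
          · intro a ha
            simp only [List.mem_cons, List.mem_append, List.mem_map] at ha
            rcases ha with (rfl | ⟨j, _, rfl⟩) | rfl | h
            · exact le_refl 0
            · positivity
            · push_cast at hLm ⊢
              omega
            · simp at h

-- ===== B-side lemmas =====

lemma pvB_step_flatten : ∀ (l : List Char) (outs : List (List Char)) (p : Bool),
    ((l.foldl pvB_step (outs, p)).1.flatten, (l.foldl pvB_step (outs, p)).2)
      = l.foldl pvStep (outs.flatten, p) := by
  intro l
  induction l with
  | nil => intro outs p; simp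
  | cons x xs ih =>
    intro outs p
    rw [List.foldl_cons, List.foldl_cons]
    have hstep : ((pvB_step (outs, p) x).1.flatten, (pvB_step (outs, p) x).2)
        = pvStep (outs.flatten, p) x := by
      simp only [pvB_step, pvStep]
      split_ifs <;> simp
    rw [show pvStep (outs.flatten, p) x
        = ((pvB_step (outs, p) x).1.flatten, (pvB_step (outs, p) x).2) from hstep.symm]
    exact ih (pvB_step (outs, p) x).1 (pvB_step (outs, p) x).2

lemma pvStep_run (δ : Bool) : ∀ (r : List Char), (∀ x ∈ r, PySem.Chars.isdigit x = δ) →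
    ∀ (out : List Char), r.foldl pvStep (out, δ) = (out ++ r, δ) := by
  intro r
  induction r with
  | nil => intro _ out; simp
  | cons x xs ih =>
    intro hall out
    have hx : PySem.Chars.isdigit x = δ := hall x (by simp)
    rw [List.foldl_cons]
    have hstep : pvStep (out, δ) x = (out ++ [x], δ) := by
      simp only [pvStep, hx]
      cases δ <;> simp
    rw [hstep, ih (fun y hy => hall y (by simp [hy])) (out ++ [x])]
    simp

lemma pvStep_reset (δ : Bool) (rest : List Char)
    (hrest : ∀ (h : rest ≠ []), PySem.Chars.isdigit (rest.head h) = !δ) (acc : List Char) :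
    pvFinish (rest.foldl pvStep (acc, δ))
      = pvFinish (rest.foldl pvStep (acc ++ (if δ then ['}'] else []), false)) := by
  cases rest with
  | nil =>
    simp only [List.foldl_nil, pvFinish]
    cases δ <;> simp
  | cons r0 rs =>
    have hr0 : PySem.Chars.isdigit r0 = !δ := by simpa using hrest (by simp)
    rw [List.foldl_cons, List.foldl_cons]
    have : pvStep (acc, δ) r0 = pvStep (acc ++ (if δ then ['}'] else []), false) r0 := by
      simp only [pvStep, hr0]
      cases δ <;> simp
    rw [this]

lemma pvB_main : ∀ (n : Nat) (P : List Char), P.length ≤ n → ∀ (acc : List Char),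
    pvFinish (P.foldl pvStep (acc, false)) = acc ++ (pvRuns P).flatMap pvT := by
  intro n
  induction n with
  | zero =>
    intro P hlen acc
    cases P with
    | nil => simp [pvFinish, pvRuns]
    | cons c cs => simp at hlen
  | succ n ih =>
    intro P hlen acc
    cases P with
    | nil => simp [pvFinish, pvRuns]
    | cons c cs =>
      have hall : ∀ x ∈ cs.takeWhile (pvq (PySem.Chars.isdigit c)),
          PySem.Chars.isdigit x = PySem.Chars.isdigit c :=
        fun x hx => eq_of_beq (by simpa [pvq] using List.mem_takeWhile_imp hx)
      have hrest := pvHead_dropWhile (PySem.Chars.isdigit c) cs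
      have hsplit : cs = cs.takeWhile (pvq (PySem.Chars.isdigit c))
          ++ cs.dropWhile (pvq (PySem.Chars.isdigit c)) :=
        (List.takeWhile_append_dropWhile).symm
      rw [List.foldl_cons]
      have hfirst : pvStep (acc, false) c
          = (acc ++ (if PySem.Chars.isdigit c then ['_', '{'] else []) ++ [c],
             PySem.Chars.isdigit c) := by
        simp only [pvStep]
        cases hd : PySem.Chars.isdigit c <;> simp
      rw [hfirst]
      conv_lhs => rw [hsplit]
      rw [List.foldl_append,
          pvStep_run (PySem.Chars.isdigit c) _ hall
            (acc ++ (if PySem.Chars.isdigit c then ['_', '{'] else []) ++ [c]),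
          pvStep_reset (PySem.Chars.isdigit c) _ hrest]
      have hdwlen : (cs.dropWhile (pvq (PySem.Chars.isdigit c))).length ≤ n := by
        have h1 := List.length_dropWhile_le (pvq (PySem.Chars.isdigit c)) cs
        simp only [List.length_cons] at hlen
        omega
      rw [ih _ hdwlen]
      rw [pvRuns_cons]
      have hT : pvT (c :: cs.takeWhile (pvq (PySem.Chars.isdigit c)))
          = (if PySem.Chars.isdigit c then ['_', '{'] else [])
            ++ [c] ++ cs.takeWhile (pvq (PySem.Chars.isdigit c))
            ++ (if PySem.Chars.isdigit c then ['}'] else []) := by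
        by_cases hd : PySem.Chars.isdigit c = true
        · have hdig : PySem.Chars.strIsdigit (c :: cs.takeWhile (pvq (PySem.Chars.isdigit c)))
              = true := by
            simp only [PySem.Chars.strIsdigit, List.isEmpty_cons, Bool.not_false, Bool.true_and]
            rw [List.all_eq_true]
            intro x hx
            rcases List.mem_cons.mp hx with h | h
            · rw [h]; exact hd
            · rw [hall x h]; exact hd
          simp only [pvT, hdig]
          rw [if_pos trivial]
          simp [hd]
        · have hd' : PySem.Chars.isdigit c = false := by simpa using hd
          have hdig : PySem.Chars.strIsdigit (c :: cs.takeWhile (pvq (PySem.Chars.isdigit c)))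
              = false := by
            simp [PySem.Chars.strIsdigit, hd']
          simp only [pvT, hdig]
          rw [if_neg (by simp)]
          simp [hd']
      rw [List.flatMap_cons, hT]
      simp

-- ===== transform as a map =====

lemma pvTransform_eq_map (els : List (List Char)) : pvA_transform els = els.map pvT := by
  unfold pvA_transform pvT
  rw [PySem.List.foldl_append_singleton_eq_map (f := fun e =>
    if PySem.Chars.strIsdigit e then ['_', '{'] ++ e ++ ['}'] else e)]
  simp

-- ===== VERDICT (by name: the statement is the Claim_ definition above) =====

theorem pretty_print_molecule_spec : Claim_equal_pretty_print_molecule := by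
  unfold Claim_equal_pretty_print_molecule
  intro molecule _ _
  unfold Spec_pretty_print_molecule
  unfold pretty_print_molecule pretty_print_molecule_alt
  by_cases hU : PySem.Str.pyGet? molecule 0 = some 'U'
  · rw [if_pos hU, if_pos hU]
  · rw [if_neg hU, if_neg hU]
    simp only
    set P : List Char := (PySem.Str.replace (PySem.Str.replace molecule "v=0" "") "v=1" "").toList
      with hPdef
    set L : Int := PySem.Str.len molecule with hLdef
    have hL : (P.length : Int) ≤ L := by
      rw [hPdef, hLdef, PySem.Str.len_eq, PySem.Str.toList_replace, PySem.Str.toList_replace]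
      have h1 := pvReplace_len (PySem.Chars.replace molecule.toList ['v', '=', '0'] [])
        ['v', '=', '1'] (by decide)
      have h2 := pvReplace_len molecule.toList ['v', '=', '0'] (by decide)
      have he : ("" : String).toList = ([] : List Char) := rfl
      have e0 : ("v=0" : String).toList = ['v', '=', '0'] := rfl
      have e1 : ("v=1" : String).toList = ['v', '=', '1'] := rfl
      simp only [he, e0, e1]
      omega
    have hL0 : (0 : Int) ≤ L := le_trans (Int.natCast_nonneg P.length) hL
    simp only [Option.some.injEq]
    refine congrArg String.ofList ?_
    rw [pvBounds_eq_pvBN, PySem.List.insert_zero, PySem.List.insert_len,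
        pvSlices_eq_pvPair, pvTransform_eq_map, pvJoin_nil_eq_flatten]
    have hB : PySem.Chars.join []
        (if (P.foldl pvB_step ([], false)).2
         then (P.foldl pvB_step ([], false)).1 ++ [['}']]
         else (P.foldl pvB_step ([], false)).1)
        = pvFinish (P.foldl pvStep ([], false)) := by
      have hfl := pvB_step_flatten P [] false
      simp only [List.flatten_nil] at hfl
      rw [pvFinish, ← hfl]
      cases h2 : (P.foldl pvB_step ([], false)).2 <;>
        simp [pvJoin_nil_eq_flatten, List.flatten_append]
    rw [hB]
    by_cases hP : P = []
    · rw [hP]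
      have hbn : pvBN [] = [] := by simp [pvBN]
      rw [hbn]
      simp only [List.map_nil, List.foldl_nil]
      rw [List.singleton_append, pvPair_cons, pvPair_single, PySem.List.slice_zero_start,
          PySem.List.slice_to _ hL0]
      simp [pvFinish, pvT, PySem.Chars.strIsdigit]
    · rw [pvA_runs P.length P L hP (le_refl _) hL,
          pvB_main P.length P (le_refl _) []]
      rw [List.nil_append, List.flatMap_def]
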